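-- pv_equiv track=rewrite | github.com/bbchallenge/website-backend | bbchallenge_backend/utils.py | get_machine_code
-- ===== SOURCE A (Python) =====
-- def get_machine_code(machine_bytes):
--     to_ret = ""
--     for i, b in enumerate(machine_bytes):
--         if i % 3 == 0:
--             if machine_bytes[i + 2] == 0:
--                 to_ret += "-"
--                 continue
--             if b == 0:
--                 to_ret += "0"
--             else:
--                 to_ret += "1"
--         elif i % 3 == 1:
--             if machine_bytes[i + 1] == 0:
--                 to_ret += "-"
--                 continue
--             if b == 0:
--                 to_ret += "R"
--             else:
--                 to_ret += "L"
--         else: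
--             if b == 0:
--                 to_ret += "-"
--             else:
--                 to_ret += chr(ord("A") + b - 1)
--     return to_ret
-- ===== SOURCE B (Python) =====
-- def get_machine_code(machine_bytes):
--     cells = []
--     i = 0
--     while i < len(machine_bytes):
--         w, m, s = machine_bytes[i], machine_bytes[i + 1], machine_bytes[i + 2]
--         if s == 0:
--             cells.append("---")
--         else:
--             cells.append(("0" if w == 0 else "1")
--                          + ("R" if m == 0 else "L")
--                          + chr(ord("A") + s - 1))
--         i += 3
--     return "".join(cells)
-- ===== Notes on version B (the rewrite author's own statement) =====
-- stated objective: simpler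
-- what changed: One pass per 3-byte transition cell (unpack write/move/state, emit the whole cell, join at the end) instead of A's flat per-byte loop that branches on i%3 and re-reads the state byte by look-ahead indexing at two different offsets.
import Mathlib
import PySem

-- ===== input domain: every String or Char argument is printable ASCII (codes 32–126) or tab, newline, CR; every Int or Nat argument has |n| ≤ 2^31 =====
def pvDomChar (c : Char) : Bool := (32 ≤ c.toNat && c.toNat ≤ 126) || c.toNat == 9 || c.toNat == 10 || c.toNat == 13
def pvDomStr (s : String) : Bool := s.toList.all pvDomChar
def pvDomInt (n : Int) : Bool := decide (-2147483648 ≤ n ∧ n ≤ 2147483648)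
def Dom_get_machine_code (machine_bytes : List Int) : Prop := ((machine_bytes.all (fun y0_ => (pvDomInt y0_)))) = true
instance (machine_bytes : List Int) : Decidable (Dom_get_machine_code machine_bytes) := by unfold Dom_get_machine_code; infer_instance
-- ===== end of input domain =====

-- B replaces A's flat per-byte i%3 branching (with look-ahead indexing) by one loop per
-- 3-byte transition cell, collecting cells and joining; same return value on Pre_.

-- ===== PORT A =====
-- loop body of A: p = (i, b) from enumerate; string kept as List Char
def pvA_body (mb : List Int) (acc : List Char) (p : Int × Int) : List Char :=
  if PySem.Int.mod p.1 3 == 0 then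
    if (PySem.List.pyGet? mb (p.1 + 2)).getD 0 == 0 then acc ++ ['-']
    else if p.2 == 0 then acc ++ ['0'] else acc ++ ['1']
  else if PySem.Int.mod p.1 3 == 1 then
    if (PySem.List.pyGet? mb (p.1 + 1)).getD 0 == 0 then acc ++ ['-']
    else if p.2 == 0 then acc ++ ['R'] else acc ++ ['L']
  else if p.2 == 0 then acc ++ ['-']
  else acc ++ [Char.ofNat (65 + p.2 - 1).toNat]   -- chr(ord('A') + b - 1); a valid scalar on Pre_

def get_machine_code (machine_bytes : List Int) : String :=
  String.mk ((PySem.List.enumerate machine_bytes 0).foldl (pvA_body machine_bytes) [])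

-- ===== PORT B =====
-- one transition cell from (write, move, state)
def pvB_cell (w m s : Int) : List Char :=
  if s == 0 then ['-', '-', '-']
  else [(if w == 0 then '0' else '1'), (if m == 0 then 'R' else 'L'),
        Char.ofNat (65 + s - 1).toNat]

-- B's while loop: i advances by 3, cells are appended
def pvB_go (mb : List Int) (i : Nat) (cells : List (List Char)) : List (List Char) :=
  if i < mb.length then
    pvB_go mb (i + 3)
      (cells ++ [pvB_cell ((PySem.List.pyGet? mb (i : Int)).getD 0)
                          ((PySem.List.pyGet? mb ((i : Int) + 1)).getD 0)
                          ((PySem.List.pyGet? mb ((i : Int) + 2)).getD 0)])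
  else cells
termination_by mb.length - i

def get_machine_code_alt (machine_bytes : List Int) : String :=
  String.mk (PySem.Chars.join [] (pvB_go machine_bytes 0 []))

-- ===== PRECONDITION & SPEC =====
-- A raises IndexError when the length is not a multiple of 3, and ValueError from chr when a
-- nonzero state byte s (every third byte) has ord('A')+s-1 below 0 (s < -64) or above
-- 0x10FFFF (s > 1114047); additionally, for s in 55232..57279 A returns a string containing a
-- lone UTF-16 surrogate code point, which is not a value of Lean's String type, so exactly that
-- band is also excluded.
def Pre_get_machine_code (machine_bytes : List Int) : Prop :=
  machine_bytes.length % 3 = 0 ∧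
  ∀ p ∈ machine_bytes.zipIdx, p.2 % 3 = 2 →
    (-64 ≤ p.1 ∧ p.1 ≤ 1114047 ∧ ¬(55232 ≤ p.1 ∧ p.1 ≤ 57279))
instance (machine_bytes : List Int) : Decidable (Pre_get_machine_code machine_bytes) := by
  unfold Pre_get_machine_code; infer_instance

def pvWitness_get_machine_code : List Int := [1, 0, 2, 0, 1, 0]

def Spec_get_machine_code (machine_bytes : List Int) (out : String) : Prop := out = get_machine_code_alt machine_bytes
instance (machine_bytes : List Int) (out : String) : Decidable (Spec_get_machine_code machine_bytes out) := by unfold Spec_get_machine_code; infer_instance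

-- ===== CLAIM (what is proved, stated in full; the proofs are below) =====
def Claim_equal_get_machine_code : Prop := ∀ (machine_bytes : List Int), Dom_get_machine_code machine_bytes → Pre_get_machine_code machine_bytes → Spec_get_machine_code machine_bytes (get_machine_code machine_bytes)

-- ===== LEMMAS AND PROOFS =====

-- reference cell list, by triple recursion
def refCells : List Int → List (List Char)
  | w :: m :: s :: rest => pvB_cell w m s :: refCells rest
  | _ => []

theorem join_nil_eq_flatten (cells : List (List Char)) :
    PySem.Chars.join [] cells = cells.flatten := by
  induction cells with
  | nil => simp [PySem.Chars.join, List.intercalate]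
  | cons c rest ih =>
    cases rest with
    | nil => simp [PySem.Chars.join, List.intercalate]
    | cons d r => rw [PySem.Chars.join_cons_cons]; simp_all

theorem pvB_go_eq (mb : List Int) (rest : List Int) (i : Nat) (cells : List (List Char))
    (hd : mb.drop i = rest) (h3 : rest.length % 3 = 0) :
    pvB_go mb i cells = cells ++ refCells rest := by
  induction rest using refCells.induct generalizing i cells with
  | case1 w m s rest' ih =>
    have hlen : i < mb.length := by
      have := congrArg List.length hd; simp at this; omega
    have hw : mb[i]? = some w := by
      have : (mb.drop i)[0]? = some w := by rw [hd]; rfl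
      simpa [List.getElem?_drop] using this
    have hm : mb[i+1]? = some m := by
      have : (mb.drop i)[1]? = some m := by rw [hd]; rfl
      simpa [List.getElem?_drop] using this
    have hs : mb[i+2]? = some s := by
      have : (mb.drop i)[2]? = some s := by rw [hd]; rfl
      simpa [List.getElem?_drop] using this
    have hd' : mb.drop (i + 3) = rest' := by
      have : (mb.drop i).drop 3 = rest' := by rw [hd]; rfl
      simpa [List.drop_drop, Nat.add_comm] using this
    rw [pvB_go]
    have c1 : ((i : Int) + 1) = ((i + 1 : Nat) : Int) := by push_cast; ring
    have c2 : ((i : Int) + 2) = ((i + 2 : Nat) : Int) := by push_cast; ring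
    simp only [hlen, if_pos, c1, c2, PySem.List.pyGet?_natCast, hw, hm, hs, Option.getD_some]
    rw [ih (i + 3) _ hd' (by simp at h3; omega)]
    simp [refCells]
  | case2 rest hne =>
    -- rest does not start with a full triple; with length % 3 = 0 it is []
    rcases rest with _ | ⟨w, _ | ⟨m, _ | ⟨s, r⟩⟩⟩
    · have : mb.length ≤ i := by
        have := congrArg List.length hd; simp at this; omega
      rw [pvB_go]; simp [Nat.not_lt.mpr this, refCells]
    · simp at h3
    · simp at h3
    · exact (hne w m s r rfl).elim

theorem pvA_loop_eq (mb : List Int) (rest : List Int) (k : Nat) (acc : List Char)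
    (hd : mb.drop k = rest) (hk : k % 3 = 0) (h3 : rest.length % 3 = 0) :
    (PySem.List.enumerate rest (k : Int)).foldl (pvA_body mb) acc
      = acc ++ (refCells rest).flatten := by
  induction rest using refCells.induct generalizing k acc with
  | case1 w m s rest' ih =>
    have hs : mb[k+2]? = some s := by
      have : (mb.drop k)[2]? = some s := by rw [hd]; rfl
      simpa [List.getElem?_drop] using this
    have hd' : mb.drop (k + 3) = rest' := by
      have : (mb.drop k).drop 3 = rest' := by rw [hd]; rfl
      simpa [List.drop_drop, Nat.add_comm] using this
    have h3' : rest'.length % 3 = 0 := by simp at h3; omega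
    have e2 : (k : Int) + 1 + 1 = (k : Int) + 2 := by ring
    have c1 : ((k : Int) + 1) = ((k + 1 : Nat) : Int) := by push_cast; ring
    have c2 : ((k : Int) + 2) = ((k + 2 : Nat) : Int) := by push_cast; ring
    have m0 : PySem.Int.mod (k : Int) 3 = 0 := by
      rw [show (3 : Int) = ((3 : Nat) : Int) from rfl, PySem.Int.mod_natCast, hk]; rfl
    have m1 : PySem.Int.mod ((k : Int) + 1) 3 = 1 := by
      rw [c1, show (3 : Int) = ((3 : Nat) : Int) from rfl, PySem.Int.mod_natCast,
        show (k + 1) % 3 = 1 by omega]; rfl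
    have m2 : PySem.Int.mod ((k : Int) + 2) 3 = 2 := by
      rw [c2, show (3 : Int) = ((3 : Nat) : Int) from rfl, PySem.Int.mod_natCast,
        show (k + 2) % 3 = 2 by omega]; rfl
    rw [PySem.List.enumerate_cons, PySem.List.enumerate_cons, PySem.List.enumerate_cons]
    simp only [List.foldl_cons]
    have step1 : pvA_body mb acc ((k : Int), w)
        = acc ++ (if s = 0 then ['-'] else [if w = 0 then '0' else '1']) := by
      simp only [pvA_body, m0]
      rw [show (k : Int) + 2 = ((k + 2 : Nat) : Int) from c2, PySem.List.pyGet?_natCast, hs]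
      by_cases h : s = 0 <;> by_cases hw : w = 0 <;> simp [h, hw]
    have step2 : ∀ a, pvA_body mb a ((k : Int) + 1, m)
        = a ++ (if s = 0 then ['-'] else [if m = 0 then 'R' else 'L']) := by
      intro a
      simp only [pvA_body, m1]
      rw [show (k : Int) + 1 + 1 = ((k + 2 : Nat) : Int) by push_cast; ring,
        PySem.List.pyGet?_natCast, hs]
      by_cases h : s = 0 <;> by_cases hm : m = 0 <;> simp [h, hm]
    have step3 : ∀ a, pvA_body mb a ((k : Int) + 2, s)
        = a ++ (if s = 0 then ['-'] else [Char.ofNat (65 + s - 1).toNat]) := by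
      intro a
      simp only [pvA_body, m2]
      by_cases h : s = 0 <;> simp [h]
    rw [step1, step2, e2, step3,
      show (k : Int) + 2 + 1 = ((k + 3 : Nat) : Int) by push_cast; ring,
      ih (k + 3) _ hd' (by omega) h3']
    by_cases h : s = 0 <;> simp [refCells, pvB_cell, h]
  | case2 rest hne =>
    rcases rest with _ | ⟨w, _ | ⟨m, _ | ⟨s, r⟩⟩⟩
    · simp [PySem.List.enumerate, refCells]
    · simp at h3
    · simp at h3
    · exact (hne w m s r rfl).elim

-- ===== VERDICT (by name: the statement is the Claim_ definition above) =====
theorem get_machine_code_spec : Claim_equal_get_machine_code := by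
  intro mb _ hpre
  unfold Spec_get_machine_code get_machine_code get_machine_code_alt
  have hA := pvA_loop_eq mb mb 0 [] (by simp) (by simp) hpre.1
  rw [show ((0 : Nat) : Int) = 0 from rfl] at hA
  rw [hA, pvB_go_eq mb mb 0 [] (by simp) hpre.1, join_nil_eq_flatten]
  simp
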